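-- pv_equiv track=rewrite | github.com/tulustul/advent-of-code | 2015/day-8.py | in_memory_len
-- ===== SOURCE A (Python) =====
-- def in_memory_len(s:str):
--     count = 0
--     skip = 0
--     for i in range(len(s)):
--         ss = s[i:]
--         if skip:
--             skip -=1
--             continue
--         if ss.startswith('"'):
--             continue
--         if ss.startswith('\\"'):
--             count += 1
--             skip = 1
--             continue
--         if ss.startswith('\\\\'):
--             count += 1
--             skip = 1
--             continue
--         if ss.startswith("\\x"):
--             count += 1
--             skip = 3
--             continue
--         count +=1
--     return count
-- ===== SOURCE B (Python) =====
-- def _tokens(s):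
--     # Tokenizer: split s into escape/character tokens (like a regex findall
--     # over  \x.{0,2} | \\ | \" | " | . ), longest escape first.
--     i = 0
--     L = len(s)
--     while i < L:
--         if s[i] == '\\' and s[i + 1:i + 2] == 'x':
--             yield s[i:i + 4]
--             i += 4
--         elif s[i] == '\\' and s[i + 1:i + 2] in ('\\', '"'):
--             yield s[i:i + 2]
--             i += 2
--         else:
--             yield s[i]
--             i += 1
--
-- def in_memory_len(s: str):
--     # In-memory length = number of tokens that are not a bare quote.
--     return sum(1 for t in _tokens(s) if t != '"')
-- ===== Notes on version B (the rewrite author's own statement) =====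
-- stated objective: faster
-- what changed: A is a single indexed pass that slices a fresh suffix s[i:] at every position and threads a skip counter through the loop; B tokenizes the string into escape/character tokens with a generator and then counts the tokens that are not a bare quote (tokenize-then-filter-count, no skip state, no per-index suffix slices).
import Mathlib
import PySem

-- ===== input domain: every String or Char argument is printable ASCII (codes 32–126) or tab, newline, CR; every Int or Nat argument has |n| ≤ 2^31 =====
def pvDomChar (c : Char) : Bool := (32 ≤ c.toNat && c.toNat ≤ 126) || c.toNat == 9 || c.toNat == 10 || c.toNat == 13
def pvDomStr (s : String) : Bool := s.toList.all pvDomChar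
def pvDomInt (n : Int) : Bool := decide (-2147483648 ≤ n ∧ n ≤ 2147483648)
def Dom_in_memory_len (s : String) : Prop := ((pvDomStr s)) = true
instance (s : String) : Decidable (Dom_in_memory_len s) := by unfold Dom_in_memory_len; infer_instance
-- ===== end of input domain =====

-- B replaces A's per-index scan (skip counter + a fresh suffix slice at every
-- position) by a two-stage tokenize-then-count: split the string into
-- escape/character tokens, then count the tokens that are not a bare quote.

-- ===== PORT A =====
-- A's loop over i in range(len(s)) with ss = s[i:]: the obvious structural
-- recursion over the suffix, with the same (count, skip) state; the
-- ss.startswith checks become checks on the head characters of the suffix.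
def inMemGoA : List Char → Int → Int → Int
  | [], count, _ => count
  | c :: rest, count, skip =>
    if skip ≠ 0 then inMemGoA rest count (skip - 1)
    else if c = '"' then inMemGoA rest count skip
    else if c = '\\' ∧ rest.head? = some '"' then inMemGoA rest (count + 1) 1
    else if c = '\\' ∧ rest.head? = some '\\' then inMemGoA rest (count + 1) 1
    else if c = '\\' ∧ rest.head? = some 'x' then inMemGoA rest (count + 1) 3
    else inMemGoA rest (count + 1) skip

def in_memory_len (s : String) : Int := inMemGoA s.toList 0 0

-- ===== PORT B =====
-- Source B's _tokens generator: emit the token at the cursor (\x plus up to two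
-- chars, a two-char escape, or a single char) and continue past it.
def inMemTok : List Char → List (List Char)
  | [] => []
  | c :: r =>
    if c = '\\' ∧ r.head? = some 'x' then
      (c :: r.take 3) :: inMemTok (r.tail.drop 2)
    else if c = '\\' ∧ (r.head? = some '\\' ∨ r.head? = some '"') then
      (c :: r.take 1) :: inMemTok r.tail
    else
      [c] :: inMemTok r
termination_by l => l.length
decreasing_by
  all_goals simp [List.length_drop, List.length_tail]
  all_goals omega

-- sum(1 for t in tokens if t != '"')
def in_memory_len_alt (s : String) : Int :=
  ((inMemTok s.toList).filter (fun t => t ≠ ['"'])).length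

-- ===== PRECONDITION & SPEC =====
def Spec_in_memory_len (s : String) (out : Int) : Prop := out = in_memory_len_alt s
instance (s : String) (out : Int) : Decidable (Spec_in_memory_len s out) := by unfold Spec_in_memory_len; infer_instance

-- ===== CLAIM (what is proved, stated in full; the proofs are below) =====
def Claim_equal_in_memory_len : Prop := ∀ (s : String), Dom_in_memory_len s → Spec_in_memory_len s (in_memory_len s)

-- ===== LEMMAS AND PROOFS =====

-- B's count of non-quote tokens of a suffix, as an Int.
def inMemCnt (l : List Char) : Int :=
  ((inMemTok l).filter (fun t => t ≠ ['"'])).length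

-- A's state (count, skip) relates to B's token count of the unskipped suffix.
theorem inMemGoA_eq (l : List Char) : ∀ (count skip : Int), 0 ≤ skip →
    inMemGoA l count skip = count + inMemCnt (l.drop skip.toNat) := by
  induction l with
  | nil => intro count skip _; simp [inMemGoA, inMemCnt, inMemTok]
  | cons c rest ih =>
    intro count skip hskip
    by_cases h0 : skip = 0
    · subst h0
      rw [show ((0:Int)).toNat = 0 from rfl, List.drop_zero]
      rw [show inMemGoA (c :: rest) count 0 =
            (if c = '"' then inMemGoA rest count 0
             else if c = '\\' ∧ rest.head? = some '"' then inMemGoA rest (count + 1) 1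
             else if c = '\\' ∧ rest.head? = some '\\' then inMemGoA rest (count + 1) 1
             else if c = '\\' ∧ rest.head? = some 'x' then inMemGoA rest (count + 1) 3
             else inMemGoA rest (count + 1) 0) from by simp [inMemGoA]]
      by_cases hq : c = '"'
      · subst hq
        rw [if_pos rfl, show inMemCnt ('"' :: rest) = inMemCnt rest from by
          simp [inMemCnt, inMemTok], ih count 0 le_rfl]
        rfl
      · by_cases hb : c = '\\'
        · subst hb
          rcases hh : rest.head? with _ | d
          · have hrest : rest = [] := by cases rest <;> simp_all
            subst hrest
            simp [inMemGoA, inMemCnt, inMemTok]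
          · by_cases hdq : d = '"'
            · rw [if_neg hq, if_pos ⟨rfl, by rw [hdq]⟩,
                ih (count + 1) 1 (by omega)]
              rw [show inMemCnt ('\\' :: rest) = 1 + inMemCnt rest.tail from by
                simp [inMemCnt, inMemTok, hh, hdq]; omega]
              rw [show ((1:Int)).toNat = 1 from rfl,
                show rest.drop 1 = rest.tail from List.drop_one]
              ring
            · by_cases hdb : d = '\\'
              · rw [if_neg hq, if_neg (by simp [hdq]), if_pos ⟨rfl, by rw [hdb]⟩,
                  ih (count + 1) 1 (by omega)]
                rw [show inMemCnt ('\\' :: rest) = 1 + inMemCnt rest.tail from by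
                  simp [inMemCnt, inMemTok, hh, hdb]; omega]
                rw [show ((1:Int)).toNat = 1 from rfl,
                  show rest.drop 1 = rest.tail from List.drop_one]
                ring
              · by_cases hdx : d = 'x'
                · rw [if_neg hq, if_neg (by simp [hdq]), if_neg (by simp [hdb]),
                    if_pos ⟨rfl, by rw [hdx]⟩, ih (count + 1) 3 (by omega)]
                  rw [show inMemCnt ('\\' :: rest) = 1 + inMemCnt (rest.tail.drop 2) from by
                    simp [inMemCnt, inMemTok, hh, hdx]; omega]
                  rw [show ((3:Int)).toNat = 3 from rfl,
                    show rest.drop 3 = rest.tail.drop 2 from by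
                      cases rest <;> simp [List.drop]]
                  ring
                · rw [if_neg hq, if_neg (by simp [hdq]), if_neg (by simp [hdb]),
                    if_neg (by simp [hdx]), ih (count + 1) 0 le_rfl]
                  rw [show inMemCnt ('\\' :: rest) = 1 + inMemCnt rest from by
                    simp [inMemCnt, inMemTok, hh, hdq, hdb, hdx]; omega]
                  rw [show ((0:Int)).toNat = 0 from rfl, List.drop_zero]
                  ring
        · rw [if_neg hq, if_neg (by simp [hb]), if_neg (by simp [hb]),
            if_neg (by simp [hb]), ih (count + 1) 0 le_rfl]
          rw [show inMemCnt (c :: rest) = 1 + inMemCnt rest from by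
            simp [inMemCnt, inMemTok, hq, hb]; omega]
          rw [show ((0:Int)).toNat = 0 from rfl, List.drop_zero]
          ring
    · have h1 : (1:Int) ≤ skip := by omega
      have hdrop : (c :: rest).drop skip.toNat = rest.drop (skip - 1).toNat := by
        rw [show skip.toNat = (skip - 1).toNat + 1 from by omega]
        rfl
      rw [show inMemGoA (c :: rest) count skip = inMemGoA rest count (skip - 1) from by
        simp [inMemGoA, h0], ih count (skip - 1) (by omega), hdrop]

-- ===== VERDICT (by name: the statement is the Claim_ definition above) =====
theorem in_memory_len_spec : Claim_equal_in_memory_len := by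
  intro s _
  unfold Spec_in_memory_len in_memory_len in_memory_len_alt
  rw [inMemGoA_eq s.toList 0 0 le_rfl]
  simp [inMemCnt]
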